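-- pv_equiv track=rewrite | github.com/dss1222/algorithm-practice | programmers/level0/안전 지대.py | solution
-- ===== SOURCE A (Python) =====
-- def solution(sides):
--     max_side = max(sides)
--     min_side = min(sides)
--
--     side_list = []
--
--     for i in range(max_side - min_side + 1, max_side + 1):
--         side_list.append(i)
--     for i in range(max_side + 1, max_side + min_side):
--         side_list.append(i)
--     return len(set(side_list))
-- ===== SOURCE B (Python) =====
-- def solution(sides):
--     m = min(sides)
--     return max(0, 2 * m - 1)
-- ===== Notes on version B (the rewrite author's own statement) =====
-- stated objective: simpler
-- what changed: Replaces building two explicit ranges of side lengths and counting their set by the closed form max(0, 2*min(sides)-1).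
import Mathlib
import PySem

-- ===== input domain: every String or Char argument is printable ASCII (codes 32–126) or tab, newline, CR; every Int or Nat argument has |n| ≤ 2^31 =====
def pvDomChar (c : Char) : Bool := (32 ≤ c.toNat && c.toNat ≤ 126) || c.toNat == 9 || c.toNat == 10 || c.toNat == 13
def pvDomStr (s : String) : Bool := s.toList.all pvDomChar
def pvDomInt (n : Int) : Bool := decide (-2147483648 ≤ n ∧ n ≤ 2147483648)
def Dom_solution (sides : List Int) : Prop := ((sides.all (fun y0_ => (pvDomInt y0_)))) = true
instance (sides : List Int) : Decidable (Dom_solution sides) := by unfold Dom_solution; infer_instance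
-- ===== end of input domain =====

-- B replaces A's explicit range-building and set-counting by the closed form max(0, 2*min(sides)-1): simpler.

-- ===== PORT A =====
def solution (sides : List Int) : Int :=
  match PySem.List.max? sides (fun x => x), PySem.List.min? sides (fun x => x) with
  | some maxSide, some minSide =>
    let sideList : List Int := []
    let sideList := (PySem.List.pyRange (maxSide - minSide + 1) (maxSide + 1) 1).foldl
      (fun acc i => acc ++ [i]) sideList
    let sideList := (PySem.List.pyRange (maxSide + 1) (maxSide + minSide) 1).foldl
      (fun acc i => acc ++ [i]) sideList
    ((PySem.Set.ofList sideList).length : Int)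
  | _, _ => 0  -- unreachable under Pre_solution (max/min of an empty list raise)

-- ===== PORT B =====
def solution_alt (sides : List Int) : Int :=
  match PySem.List.min? sides (fun x => x) with
  | some m => max 0 (2 * m - 1)
  | none => 0  -- unreachable under Pre_solution

-- ===== PRECONDITION & SPEC =====
-- Pre_ excludes exactly the empty list, on which A raises ValueError (max of empty sequence).
def Pre_solution (sides : List Int) : Prop := sides ≠ []
instance (sides : List Int) : Decidable (Pre_solution sides) := by unfold Pre_solution; infer_instance
def pvWitness_solution : List Int := [3, 5, 2]

def Spec_solution (sides : List Int) (out : Int) : Prop := out = solution_alt sides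
instance (sides : List Int) (out : Int) : Decidable (Spec_solution sides out) := by unfold Spec_solution; infer_instance

-- ===== CLAIM (what is proved, stated in full; the proofs are below) =====
def Claim_equal_solution : Prop := ∀ (sides : List Int), Dom_solution sides → Pre_solution sides → Spec_solution sides (solution sides)

-- ===== LEMMAS AND PROOFS =====

-- ===== VERDICT (by name: the statement is the Claim_ definition above) =====
theorem solution_spec : Claim_equal_solution := by
  intro sides _hdom hpre
  obtain ⟨x, t, rfl⟩ : ∃ x t, sides = x :: t := by
    cases sides with
    | nil => exact absurd rfl hpre
    | cons x t => exact ⟨x, t, rfl⟩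
  unfold Spec_solution solution solution_alt
  rw [PySem.List.max?_id_cons, PySem.List.min?_id_cons]
  set M := t.foldl max x with hM
  set m := t.foldl min x with hm
  have hmM : m ≤ M := le_trans (PySem.List.foldl_min_le t x).1 (PySem.List.le_foldl_max t x).1
  simp only [PySem.List.foldl_append_singleton_eq_self, List.nil_append]
  by_cases hle : m ≤ 0
  · rw [PySem.List.pyRange_one_eq_nil (by omega), PySem.List.pyRange_one_eq_nil (by omega)]
    simp [PySem.Set.ofList]
    omega
  · have hpos : 0 < m := by omega
    rw [← PySem.List.pyRange_one_append (M - m + 1) (M + 1) (M + m) (by omega) (by omega),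
      PySem.Set.ofList_eq_self_of_nodup _ (PySem.List.nodup_pyRange_one _ _),
      PySem.List.length_pyRange_one]
    omega
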